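-- pv_equiv track=rewrite | github.com/mediajkgupta/ai-cto-system | ai_cto/verification/checks.py | detect_stack
-- ===== SOURCE A (Python) =====
-- def detect_stack(files: dict[str, str]) -> str:
--     """
--     Detect the primary language stack from the generated file set.
--     Returns 'node', 'python', or 'unknown'.
--
--     Node.js: any .js/.ts file or package.json present.
--     Python:  at least one non-empty .py file present.
--     An empty main.py created as a DebugAgent placeholder does NOT count as Python.
--     """
--     js_files = [p for p in files if p.endswith(".js") or p.endswith(".ts")]
--     has_package_json = any(
--         p == "package.json" or p.endswith("/package.json") for p in files
--     )
--     if js_files or has_package_json: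
--         return "node"
--     meaningful_py = [p for p in files if p.endswith(".py") and files[p].strip()]
--     if meaningful_py:
--         return "python"
--     return "unknown"
-- ===== SOURCE B (Python) =====
-- def detect_stack(files: dict[str, str]) -> str:
--     """Single pass: 'node' wins immediately; otherwise remember whether a
--     non-empty .py file was seen."""
--     saw_py = False
--     for path, content in files.items():
--         if (path.endswith(".js") or path.endswith(".ts")
--                 or path == "package.json" or path.endswith("/package.json")):
--             return "node"
--         if path.endswith(".py") and content.strip():
--             saw_py = True
--     return "python" if saw_py else "unknown"
-- ===== Notes on version B (the rewrite author's own statement) =====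
-- stated objective: simpler
-- what changed: Replaces A's three separate scans (two comprehensions plus an any, with a dict lookup files[p] inside the .py scan) by one flag-accumulating pass over files.items() that early-returns 'node' and otherwise sets a saw_py flag.
import Mathlib
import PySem

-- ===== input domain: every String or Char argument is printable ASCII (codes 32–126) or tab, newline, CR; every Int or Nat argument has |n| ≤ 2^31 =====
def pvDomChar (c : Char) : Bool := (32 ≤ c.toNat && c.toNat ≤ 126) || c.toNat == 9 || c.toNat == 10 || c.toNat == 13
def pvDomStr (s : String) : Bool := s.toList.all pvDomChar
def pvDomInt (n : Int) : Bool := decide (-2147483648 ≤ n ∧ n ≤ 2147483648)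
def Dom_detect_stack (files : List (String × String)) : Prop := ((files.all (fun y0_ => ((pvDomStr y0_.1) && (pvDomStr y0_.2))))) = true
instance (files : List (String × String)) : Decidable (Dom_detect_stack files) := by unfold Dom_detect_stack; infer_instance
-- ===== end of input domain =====

-- B: one flag-accumulating pass over the items (early 'node' return) instead of A's three scans; return value only.


-- ===== PORT A =====
def detect_stack (files : List (String × String)) : String :=
  let keys := files.map Prod.fst
  let js_files := keys.filter (fun p => PySem.Str.endswith p ".js" || PySem.Str.endswith p ".ts")
  let has_package_json := keys.any (fun p => p == "package.json" || PySem.Str.endswith p "/package.json")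
  if !js_files.isEmpty || has_package_json then "node"
  else
    let meaningful_py := keys.filter (fun p =>
      PySem.Str.endswith p ".py" && !(PySem.Str.strip (((PySem.Dict.mk files).get? p).getD "") == ""))
    if !meaningful_py.isEmpty then "python" else "unknown"

-- ===== PORT B =====
def detectStackGo : List (String × String) → Bool → String
  | [], sawPy => if sawPy then "python" else "unknown"
  | (p, c) :: rest, sawPy =>
    if PySem.Str.endswith p ".js" || PySem.Str.endswith p ".ts"
        || p == "package.json" || PySem.Str.endswith p "/package.json" then "node"
    else detectStackGo rest
      (sawPy || (PySem.Str.endswith p ".py" && !(PySem.Str.strip c == "")))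

def detect_stack_alt (files : List (String × String)) : String :=
  detectStackGo files false

-- ===== PRECONDITION & SPEC =====
-- Pre_ requires pairwise-distinct keys: the argument is a Python dict, which cannot carry duplicate keys.
def Pre_detect_stack (files : List (String × String)) : Prop := (files.map Prod.fst).Nodup
instance (files : List (String × String)) : Decidable (Pre_detect_stack files) := by unfold Pre_detect_stack; infer_instance
def pvWitness_detect_stack : (List (String × String)) := [("main.py", "print(1)"), ("readme.txt", "")]
def Spec_detect_stack (files : List (String × String)) (out : String) : Prop := out = detect_stack_alt files
instance (files : List (String × String)) (out : String) : Decidable (Spec_detect_stack files out) := by unfold Spec_detect_stack; infer_instance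

-- ===== CLAIM (what is proved, stated in full; the proofs are below) =====
def Claim_equal_detect_stack : Prop := ∀ (files : List (String × String)), Dom_detect_stack files → Pre_detect_stack files → Spec_detect_stack files (detect_stack files)

-- ===== LEMMAS AND PROOFS =====
def pvNodeP (p : String) : Bool :=
  PySem.Str.endswith p ".js" || PySem.Str.endswith p ".ts"
    || p == "package.json" || PySem.Str.endswith p "/package.json"

def pvPyP (p c : String) : Bool :=
  PySem.Str.endswith p ".py" && !(PySem.Str.strip c == "")

theorem detectStackGo_spec (files : List (String × String)) (saw : Bool) :
    detectStackGo files saw =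
      if files.any (fun kv => pvNodeP kv.1) then "node"
      else if saw || files.any (fun kv => pvPyP kv.1 kv.2) then "python" else "unknown" := by
  induction files generalizing saw with
  | nil => simp [detectStackGo]
  | cons kv rest ih =>
    obtain ⟨p, c⟩ := kv
    have e1 : (PySem.Str.endswith p ".js" || PySem.Str.endswith p ".ts"
        || p == "package.json" || PySem.Str.endswith p "/package.json") = pvNodeP p := rfl
    have e2 : (PySem.Str.endswith p ".py" && !(PySem.Str.strip c == "")) = pvPyP p c := rfl
    simp only [detectStackGo, e1, e2, List.any_cons]
    cases hb : pvNodeP p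
    · simp only [Bool.false_eq_true, if_false, Bool.false_or, ih, Bool.or_assoc]
      rfl
    · simp

theorem lookup_of_mem_nodup (L : List (String × String))
    (h : (L.map Prod.fst).Nodup) (kv : String × String) (hm : kv ∈ L) :
    (PySem.Dict.mk L).get? kv.1 = some kv.2 := by
  induction L with
  | nil => simp at hm
  | cons kv' rest ih =>
    obtain ⟨k, v⟩ := kv'
    simp only [List.map_cons, List.nodup_cons] at h
    rcases List.mem_cons.mp hm with heq | hm'
    · subst heq
      simp [PySem.Dict.get?_mk_cons]
    · have hk : k ≠ kv.1 := by
        intro hkp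
        exact h.1 (hkp ▸ (List.mem_map.mpr ⟨kv, hm', rfl⟩))
      rw [PySem.Dict.get?_mk_cons]
      simp only [beq_iff_eq, hk, if_false]
      exact ih h.2 hm'

theorem filter_nonempty_any (l : List String) (f : String → Bool) :
    (!(l.filter f).isEmpty) = l.any f := by
  induction l with
  | nil => simp
  | cons x xs ih => by_cases h : f x <;> simp [h, ih]

theorem node_scans_merge (L : List (String × String)) :
    ((L.map Prod.fst).any (fun p => PySem.Str.endswith p ".js" || PySem.Str.endswith p ".ts")
      || (L.map Prod.fst).any (fun p => p == "package.json" || PySem.Str.endswith p "/package.json"))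
      = L.any (fun kv => pvNodeP kv.1) := by
  induction L with
  | nil => simp
  | cons kv rest ih =>
    obtain ⟨p, c⟩ := kv
    simp only [List.map_cons, List.any_cons, pvNodeP]
    cases PySem.Str.endswith p ".js" <;> cases PySem.Str.endswith p ".ts"
      <;> cases hq : (p == "package.json") <;> cases PySem.Str.endswith p "/package.json"
      <;> simp only [Bool.false_or, Bool.or_false, Bool.true_or, Bool.or_true]
      <;> first | rfl | exact ih

-- ===== VERDICT (by name: the statement is the Claim_ definition above) =====
theorem detect_stack_spec : Claim_equal_detect_stack := by
  intro files _ hpre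
  unfold Spec_detect_stack detect_stack_alt detect_stack
  rw [detectStackGo_spec]
  simp only [filter_nonempty_any, Bool.false_or]
  rw [node_scans_merge]
  have hpy : (files.map Prod.fst).any (fun p =>
      PySem.Str.endswith p ".py" && !(PySem.Str.strip (((PySem.Dict.mk files).get? p).getD "") == ""))
      = files.any (fun kv => pvPyP kv.1 kv.2) := by
    rw [List.any_map, Bool.eq_iff_iff]
    simp only [List.any_eq_true, Function.comp]
    constructor
    · rintro ⟨kv, hkv, h⟩
      exact ⟨kv, hkv, by simpa [pvPyP, lookup_of_mem_nodup files hpre kv hkv] using h⟩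
    · rintro ⟨kv, hkv, h⟩
      exact ⟨kv, hkv, by simpa [pvPyP, lookup_of_mem_nodup files hpre kv hkv] using h⟩
  rw [hpy]
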